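-- pv_equiv track=rewrite | github.com/DipperChen2007/Skibidi_Enhancer | S/12/12_s3.py | Absolutely_Acidic
-- ===== SOURCE A (Python) =====
-- from collections import Counter
-- from collections import defaultdict
--
-- def Absolutely_Acidic(lst):
--
--     # [1 1 1 10 10 10 2 2 3 3]
--     # {1: 3, 10: 3, 2: 2, 3: 2}
--     count = Counter(lst)
--     freqToNumbers = defaultdict(list)
--     for key, val in count.items():
--         freqToNumbers[val].append(key)
--
--     # {3: [1, 10], 2: [2, 3]}
--     # 对freqToNumbers按frequency进行sort，找出最大和第二大freq
--     sort_freq = (sorted(freqToNumbers.items(), key=lambda item: item[0],reverse = True))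
--     # [(3, [1, 10]), (2, [2, 3])]
--     # 1 1 1 10 10 10
--     # 找出最高频和第二高频的数字
--     leng_1 = len(sort_freq[0][1])
--
--
--     # 1. 第一高频 x 2 +
--         # 从第一高频种找出差值最大的数字
--         # [1, 2, 3, 4, 5]
--     if len(sort_freq) == 1 or leng_1 >= 2:
--         return max(sort_freq[0][1]) - min(sort_freq[0][1])
--     else:
--         leng_2 = len(sort_freq[1][1])
--         # 2. 第一高频 x 1，第二高频 x 1
--             # 直接得出答案
--         if leng_1 == 1 and leng_2 == 1:
--             return abs(sort_freq[0][1][0] - sort_freq[1][1][0])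
--
--         # 3. 第一高频 x 1，第二高频 x 2 +
--             # 从第二高频种找出和第一高频差值最大的数字
--             # [10] [1, 3, 5]
--         else:
--             answer = 0
--             for number in sort_freq[1][1]:
--                 answer = max(answer,abs(sort_freq[0][1][0] - number))
--             return answer
-- ===== SOURCE B (Python) =====
-- from collections import Counter
--
-- def Absolutely_Acidic(lst):
--     count = Counter(lst)
--     m = max(count.values())
--     top = [k for k, v in count.items() if v == m]
--     if len(top) >= 2 or len(count) == len(top):
--         return max(top) - min(top)
--     m2 = max(v for v in count.values() if v != m)
--     x = top[0]
--     return max(abs(x - k) for k, v in count.items() if v == m2)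
-- ===== Notes on version B (the rewrite author's own statement) =====
-- stated objective: alternative
-- what changed: B selects the top and second-highest frequency buckets directly by single passes over the Counter (running max, then filters) instead of A's defaultdict grouping plus a descending sort of the frequency groups.
-- outside the precondition, e.g. on Absolutely_Acidic([]): A raises IndexError, B raises ValueError
import Mathlib
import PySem

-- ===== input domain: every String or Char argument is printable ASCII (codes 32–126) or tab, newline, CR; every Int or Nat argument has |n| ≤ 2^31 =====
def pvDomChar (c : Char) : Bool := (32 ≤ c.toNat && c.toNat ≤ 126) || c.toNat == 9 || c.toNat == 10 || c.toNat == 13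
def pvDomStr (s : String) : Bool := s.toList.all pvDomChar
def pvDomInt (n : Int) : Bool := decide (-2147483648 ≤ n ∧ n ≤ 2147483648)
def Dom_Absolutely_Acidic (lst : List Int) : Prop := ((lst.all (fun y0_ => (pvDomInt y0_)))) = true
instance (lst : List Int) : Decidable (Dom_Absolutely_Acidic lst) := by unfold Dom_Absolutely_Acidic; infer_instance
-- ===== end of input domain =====

-- B replaces A's sort of the frequency groups by direct selection of the top and
-- second frequency bucket (single passes over the counter); return value only.

-- ===== PORT A =====
def Absolutely_Acidic (lst : List Int) : Int :=
  let count := PySem.Dict.counter lst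
  let freqToNumbers : PySem.Dict Int (List Int) :=
    count.items.foldl (fun d p => d.modify p.2 [] (· ++ [p.1])) PySem.Dict.empty
  let sort_freq := PySem.List.sorted freqToNumbers.items (fun it => it.1) true
  match sort_freq with
  | [] => 0  -- unreachable under Pre_: Python raises IndexError on the empty list
  | (_, g1) :: rest =>
    let leng1 := g1.length
    if rest.length = 0 ∨ 2 ≤ leng1 then
      (PySem.List.max? g1 (fun x => x)).getD 0 - (PySem.List.min? g1 (fun x => x)).getD 0
    else
      match rest with
      | [] => 0  -- unreachable: rest.length ≠ 0 here
      | (_, g2) :: _ =>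
        let leng2 := g2.length
        if leng1 = 1 ∧ leng2 = 1 then
          |((PySem.List.pyGet? g1 0).getD 0) - ((PySem.List.pyGet? g2 0).getD 0)|
        else
          g2.foldl (fun answer number =>
            max answer |((PySem.List.pyGet? g1 0).getD 0) - number|) 0

-- ===== PORT B =====
def Absolutely_Acidic_alt (lst : List Int) : Int :=
  let count := PySem.Dict.counter lst
  let m := (PySem.List.max? count.values (fun v => v)).getD 0
  let top := (count.items.filter (fun p => p.2 == m)).map (·.1)
  if 2 ≤ top.length ∨ count.size = top.length then
    (PySem.List.max? top (fun x => x)).getD 0 - (PySem.List.min? top (fun x => x)).getD 0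
  else
    let m2 := (PySem.List.max? (count.values.filter (fun v => v != m)) (fun v => v)).getD 0
    let x := (PySem.List.pyGet? top 0).getD 0
    (PySem.List.max? ((count.items.filter (fun p => p.2 == m2)).map (fun p => |x - p.1|))
      (fun y => y)).getD 0

-- ===== PRECONDITION & SPEC =====
-- Pre_ excludes only the empty list, on which A raises IndexError (and B raises ValueError).
def Pre_Absolutely_Acidic (lst : List Int) : Prop := lst ≠ []
instance (lst : List Int) : Decidable (Pre_Absolutely_Acidic lst) := by
  unfold Pre_Absolutely_Acidic; infer_instance
def pvWitness_Absolutely_Acidic : List Int := [1, 1, 2]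

def Spec_Absolutely_Acidic (lst : List Int) (out : Int) : Prop := out = Absolutely_Acidic_alt lst
instance (lst : List Int) (out : Int) : Decidable (Spec_Absolutely_Acidic lst out) := by
  unfold Spec_Absolutely_Acidic; infer_instance

-- ===== CLAIM (what is proved, stated in full; the proofs are below) =====
def Claim_equal_Absolutely_Acidic : Prop := ∀ (lst : List Int), Dom_Absolutely_Acidic lst → Pre_Absolutely_Acidic lst → Spec_Absolutely_Acidic lst (Absolutely_Acidic lst)

-- ===== LEMMAS AND PROOFS =====
def pvGrp (its : List (Int × Int)) (f : Int) : List Int :=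
  (its.filter (fun p => p.2 == f)).map (·.1)

theorem pvGetD_grpDict (its : List (Int × Int)) (f : Int) :
    (its.foldl (fun d p => d.modify p.2 [] (· ++ [p.1])) PySem.Dict.empty).getD f []
      = pvGrp its f := by
  have h := PySem.Dict.getD_foldl_modify_append (l := its.map Prod.swap)
    (d := (PySem.Dict.empty : PySem.Dict Int (List Int))) (c := f)
  rw [List.foldl_map] at h
  simpa [pvGrp, List.filter_map, List.map_map, Function.comp] using h

theorem pvKeys_grpDict (its : List (Int × Int)) :
    (its.foldl (fun d p => d.modify p.2 [] (· ++ [p.1])) PySem.Dict.empty).keys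
      = PySem.Set.ofList (its.map (·.2)) := by
  have h := PySem.Dict.keys_foldl_modify_key (l := its) (key := (·.2))
    (d0 := ([] : List Int)) (f := fun _ p => (· ++ [p.1]))
    (d := (PySem.Dict.empty : PySem.Dict Int (List Int)))
  rw [h, PySem.Set.ofList_eq_foldl]; rfl

theorem pvSorted_gt (D : List Int) (hnd : D.Nodup) :
    (PySem.List.sorted D (fun x => x) true).Pairwise (· > ·) := by
  have h1 := PySem.List.sorted_pairwise_rev (xs := D) (key := fun x => x)
  have h2 : (PySem.List.sorted D (fun x => x) true).Nodup :=
    ((PySem.List.sorted_perm _ _ _).nodup_iff).mpr hnd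
  exact (List.Pairwise.and h1 h2).imp (fun {a b} hab => lt_of_le_of_ne hab.1 (Ne.symm hab.2))

-- sort_freq of A = the strictly decreasing distinct-frequency list, mapped to its group
theorem pvSortFreq (its : List (Int × Int)) :
    PySem.List.sorted
        ((its.foldl (fun d p => d.modify p.2 [] (· ++ [p.1])) PySem.Dict.empty).items)
        (fun it => it.1) true
      = (PySem.List.sorted (PySem.Set.ofList (its.map (·.2))) (fun x => x) true).map
          (fun f => (f, pvGrp its f)) := by
  set F := its.foldl (fun d p => d.modify p.2 [] (· ++ [p.1])) PySem.Dict.empty with hF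
  have hk : F.keys = PySem.Set.ofList (its.map (·.2)) := pvKeys_grpDict its
  have hnd : F.keys.Nodup := by rw [hk]; exact PySem.Set.nodup_ofList _
  have hitems : F.items = (PySem.Set.ofList (its.map (·.2))).map (fun f => (f, pvGrp its f)) := by
    rw [PySem.Dict.items_eq_map_keys F hnd [], hk]
    exact List.map_congr_left (fun f _ => by rw [pvGetD_grpDict])
  rw [hitems]
  apply PySem.List.sorted_rev_eq_of_perm_of_pairwise_gt
  · exact (PySem.List.sorted_perm _ _ _).map _
  · have := pvSorted_gt (PySem.Set.ofList (its.map (·.2))) (PySem.Set.nodup_ofList _)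
    rw [List.pairwise_map]
    exact this.imp (fun {a b} h => h)

theorem pvMain (lst : List Int) (hpre : lst ≠ []) :
    Absolutely_Acidic lst = Absolutely_Acidic_alt lst := by
  obtain ⟨a, lst', rfl⟩ : ∃ a l', lst = a :: l' := by
    cases lst with | nil => exact absurd rfl hpre | cons a l' => exact ⟨a, l', rfl⟩
  simp only [Absolutely_Acidic, Absolutely_Acidic_alt]
  set its := (PySem.Dict.counter (a :: lst')).items with hits
  set freqs := its.map (·.2) with hfreqs
  have hitsne : its ≠ [] := by
    rw [hits, PySem.Dict.items_counter]
    intro h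
    have : a ∈ PySem.Set.ofList (a :: lst') := (PySem.Set.mem_ofList _ a).mpr (List.mem_cons_self ..)
    simp only [List.map_eq_nil_iff] at h
    rw [h] at this; exact absurd this (List.not_mem_nil)
  have hfne : freqs ≠ [] := by
    rw [hfreqs]; simpa using hitsne
  set D := PySem.Set.ofList freqs with hD
  have hDnd : D.Nodup := PySem.Set.nodup_ofList freqs
  set ds := PySem.List.sorted D (fun x => x) true with hds0
  have hgt : ds.Pairwise (· > ·) := pvSorted_gt D hDnd
  have hdsne : ds ≠ [] := by
    rw [hds0, Ne, PySem.List.sorted_eq_nil_iff]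
    intro h
    obtain ⟨f, fs, hf⟩ : ∃ f fs, freqs = f :: fs := by
      cases hx : freqs with
      | nil => exact absurd hx hfne | cons f fs => exact ⟨f, fs, rfl⟩
    have : f ∈ D := (PySem.Set.mem_ofList _ f).mpr (by rw [hf]; exact List.mem_cons_self ..)
    rw [h] at this; exact absurd this (List.not_mem_nil)
  obtain ⟨m0, dt, hds⟩ : ∃ m0 dt, ds = m0 :: dt := by
    cases hx : ds with
    | nil => exact absurd hx hdsne | cons m0 dt => exact ⟨m0, dt, rfl⟩
  have hmemds : ∀ y, y ∈ ds ↔ y ∈ freqs := by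
    intro y
    rw [hds0, PySem.List.mem_sorted, hD, PySem.Set.mem_ofList]
  have hm0mem : m0 ∈ freqs := (hmemds m0).mp (by rw [hds]; exact List.mem_cons_self ..)
  have hm0max : ∀ y ∈ freqs, y ≤ m0 := by
    intro y hy
    exact PySem.List.key_head_sorted_rev_ge D (fun x => x) (hds0 ▸ hds)
      y ((PySem.Set.mem_ofList _ y).mpr hy)
  -- B's running max over the counter values is m0
  have hv : (PySem.Dict.counter (a :: lst')).values = freqs := rfl
  obtain ⟨mv, hmv⟩ : ∃ mv, PySem.List.max? freqs (fun v => v) = some mv := by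
    cases hx : PySem.List.max? freqs (fun v => v) with
    | none => exact absurd ((PySem.List.max?_eq_none_iff _ _).mp hx) hfne
    | some mv => exact ⟨mv, rfl⟩
  have hmveq : mv = m0 :=
    le_antisymm (hm0max mv (PySem.List.max?_mem hmv)) (PySem.List.max?_isMax hmv m0 hm0mem)
  rw [pvSortFreq its, hds0.symm, hds]
  rw [hv, hmv]
  simp only [Option.getD_some, hmveq, List.map_cons]
  have hgrpeq : ∀ f : Int, List.map (fun x : Int × Int => x.1) (List.filter (fun p => p.2 == f) its) = pvGrp its f :=
    fun _ => rfl
  simp only [hgrpeq]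
  have hsize : (PySem.Dict.counter (a :: lst')).size = its.length := rfl
  rw [hsize]
  -- the branch conditions agree
  have hall : (∀ f ∈ freqs, f = m0) ↔ dt = [] := by
    constructor
    · intro h
      cases hx : dt with
      | nil => rfl
      | cons d dt' =>
        have hd : d ∈ freqs := (hmemds d).mp (by rw [hds, hx]; simp)
        have : m0 > d := (List.pairwise_cons.mp (hds ▸ hgt)).1 d (by rw [hx]; simp)
        exact absurd (h d hd) (by omega)
    · intro h f hf
      have : f ∈ ds := (hmemds f).mpr hf
      rw [hds, h] at this
      simpa using this
  have hlen : its.length = (pvGrp its m0).length ↔ dt = [] := by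
    rw [← hall, pvGrp, List.length_map]
    rw [eq_comm, List.length_filter_eq_length_iff]
    constructor
    · intro h f hf
      obtain ⟨p, hp, rfl⟩ := List.mem_map.mp hf
      exact eq_of_beq (h p hp)
    · intro h p hp
      exact beq_iff_eq.mpr (h p.2 (List.mem_map.mpr ⟨p, hp, rfl⟩))
  have hcond : ((List.map (fun f => (f, pvGrp its f)) dt).length = 0 ∨ 2 ≤ (pvGrp its m0).length)
      ↔ (2 ≤ (pvGrp its m0).length ∨ its.length = (pvGrp its m0).length) := by
    rw [List.length_map, List.length_eq_zero_iff, ← hlen]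
    tauto
  by_cases hc : 2 ≤ (pvGrp its m0).length ∨ its.length = (pvGrp its m0).length
  · rw [if_pos (hcond.mpr hc), if_pos hc]
  · rw [if_neg (fun h => hc (hcond.mp h)), if_neg hc]
    push Not at hc
    obtain ⟨hc1, hc2⟩ := hc
    obtain ⟨d1, dt', hdt⟩ : ∃ d1 dt', dt = d1 :: dt' := by
      cases hx : dt with
      | nil => exact absurd (hlen.mpr hx) hc2
      | cons d1 dt' => exact ⟨d1, dt', rfl⟩
    subst hdt
    simp only [List.map_cons]
    have hgrpne : ∀ f ∈ freqs, pvGrp its f ≠ [] := by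
      intro f hf
      obtain ⟨p, hp, hp2⟩ := List.mem_map.mp hf
      simp only [pvGrp, Ne, List.map_eq_nil_iff, List.filter_eq_nil_iff]
      intro h
      exact h p hp (by simp [hp2])
    obtain ⟨x, hx⟩ : ∃ x, pvGrp its m0 = [x] := by
      have h1 : 1 ≤ (pvGrp its m0).length :=
        List.length_pos_of_ne_nil (hgrpne m0 hm0mem)
      exact List.length_eq_one_iff.mp (by omega)
    have hd1mem : d1 ∈ freqs := (hmemds d1).mp (by rw [hds]; simp)
    have hd1lt : d1 < m0 := (List.pairwise_cons.mp (hds ▸ hgt)).1 d1 (by simp)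
    have hd1fil : d1 ∈ freqs.filter (fun v => v != m0) :=
      List.mem_filter.mpr ⟨hd1mem, by simp; omega⟩
    obtain ⟨mw, hmw⟩ : ∃ mw, PySem.List.max? (freqs.filter (fun v => v != m0)) (fun x => x) = some mw := by
      cases hy : PySem.List.max? (freqs.filter (fun v => v != m0)) (fun x => x) with
      | none =>
        rw [PySem.List.max?_eq_none_iff] at hy
        rw [hy] at hd1fil
        exact absurd hd1fil (List.not_mem_nil)
      | some mw => exact ⟨mw, rfl⟩
    have hmweq : mw = d1 := by
      have h1 : d1 ≤ mw := PySem.List.max?_isMax hmw d1 hd1fil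
      have h2 := List.mem_filter.mp (PySem.List.max?_mem hmw)
      have hmwne : mw ≠ m0 := by simpa using h2.2
      have : mw ∈ ds := (hmemds mw).mpr h2.1
      rw [hds] at this
      have htail : ∀ y ∈ dt', d1 > y :=
        (List.pairwise_cons.mp (List.pairwise_cons.mp (hds ▸ hgt)).2).1
      rcases List.mem_cons.mp this with h | h
      · exact absurd h hmwne
      · rcases List.mem_cons.mp h with h' | h'
        · exact h'.symm ▸ rfl
        · exact le_antisymm (le_of_lt (htail mw h')) h1
    rw [hmw]
    simp only [Option.getD_some, hmweq, hx]
    have hget : (PySem.List.pyGet? [x] 0).getD 0 = x := rfl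
    simp only [hget, List.length_singleton]
    have hBlist : (List.map (fun p : Int × Int => |x - p.1|) (List.filter (fun p => p.2 == d1) its))
        = (pvGrp its d1).map (fun n => |x - n|) := by
      simp [pvGrp, List.map_map, Function.comp]
    rw [hBlist]
    obtain ⟨k, t, hkt⟩ : ∃ k t, pvGrp its d1 = k :: t := by
      cases hy : pvGrp its d1 with
      | nil => exact absurd hy (hgrpne d1 hd1mem)
      | cons k t => exact ⟨k, t, rfl⟩
    rw [hkt]
    simp only [List.map_cons, PySem.List.max?_id_cons, Option.getD_some, List.foldl_map]
    by_cases ht : t = []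
    · subst ht
      norm_num
    · rw [if_neg (by simp [ht])]
      rw [List.foldl_cons]
      rw [max_eq_right (abs_nonneg _)]

-- ===== VERDICT (by name: the statement is the Claim_ definition above) =====
theorem Absolutely_Acidic_spec : Claim_equal_Absolutely_Acidic := by
  intro lst _ hpre
  unfold Spec_Absolutely_Acidic
  exact pvMain lst hpre
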